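-- pv_equiv track=rewrite | github.com/Sawyerg3/advent-of-code-23 | day1/part2.py | checkWordBack
-- ===== SOURCE A (Python) =====
-- def checkWordBack(line):
--     numbers = ["one", "two", "three", "four", "five", "six", "seven", "eight", "nine"]
--     temp, pos = 0, 0
--     val, x = 0 , 0
--
--     for num in numbers:
--         x += 1
--         temp = line.rfind(num)
--         if temp > -1 and (temp > pos or val == 0):
--             pos = temp
--             val = x
--
--     return val, pos
-- ===== SOURCE B (Python) =====
-- def checkWordBack(line):
--     numbers = ["one", "two", "three", "four", "five", "six", "seven", "eight", "nine"]
--     for i in range(len(line) - 1, -1, -1):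
--         for k, num in enumerate(numbers):
--             if line.startswith(num, i):
--                 return k + 1, i
--     return 0, 0
-- ===== Notes on version B (the rewrite author's own statement) =====
-- stated objective: alternative
-- what changed: Replaces nine independent rfind scans plus a running max/argmax accumulator by a single right-to-left scan over positions that returns at the first (i.e. rightmost) position where some digit word starts.
import Mathlib
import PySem

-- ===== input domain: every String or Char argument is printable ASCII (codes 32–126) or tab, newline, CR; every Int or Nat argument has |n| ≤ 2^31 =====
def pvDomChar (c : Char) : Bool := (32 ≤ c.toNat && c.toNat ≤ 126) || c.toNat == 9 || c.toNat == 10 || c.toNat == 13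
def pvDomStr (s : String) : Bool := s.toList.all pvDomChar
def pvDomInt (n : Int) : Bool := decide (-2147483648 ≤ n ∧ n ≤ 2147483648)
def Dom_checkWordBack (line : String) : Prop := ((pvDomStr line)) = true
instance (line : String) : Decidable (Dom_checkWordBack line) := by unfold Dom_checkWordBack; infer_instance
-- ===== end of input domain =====

-- B replaces A's nine independent rfind scans (with a running max/argmax) by one
-- right-to-left scan over positions that returns at the rightmost word start (objective: alternative).

-- ===== PORT A =====
def numbersA : List String := ["one", "two", "three", "four", "five", "six", "seven", "eight", "nine"]

-- state is (temp, pos, val, x), exactly A's four variables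
def stepA (line : String) (st : Int × Int × Int × Int) (num : String) : Int × Int × Int × Int :=
  let x := st.2.2.2 + 1
  let temp := PySem.Str.rfind line num
  if temp > -1 ∧ (temp > st.2.1 ∨ st.2.2.1 = 0) then (temp, temp, x, x)
  else (temp, st.2.1, st.2.2.1, x)

def checkWordBack (line : String) : Int × Int :=
  let st := numbersA.foldl (stepA line) (0, 0, 0, 0)
  (st.2.2.1, st.2.1)

-- ===== PORT B =====
def numbersB : List (List Char) := ["one", "two", "three", "four", "five", "six", "seven", "eight", "nine"].map String.toList

-- the loop 'for i in range(len(line)-1, -1, -1)': bScan cs m visits i = m-1, m-2, …, 0.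
-- Python's line.startswith(num, i) for 0 ≤ i is exactly PySem.Chars.startswith (cs.drop i) num;
-- the inner 'for k, num in enumerate(numbers): if …: return k+1, i' is findIdx?.
def bScan (cs : List Char) : Nat → Int × Int
  | 0 => (0, 0)
  | j + 1 =>
    match numbersB.findIdx? (fun num => PySem.Chars.startswith (cs.drop j) num) with
    | some k => ((k : Int) + 1, (j : Int))
    | none => bScan cs j

def checkWordBack_alt (line : String) : Int × Int :=
  bScan line.toList line.toList.length

-- ===== PRECONDITION & SPEC =====
def Spec_checkWordBack (line : String) (out : Int × Int) : Prop := out = checkWordBack_alt line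
instance (line : String) (out : Int × Int) : Decidable (Spec_checkWordBack line out) := by unfold Spec_checkWordBack; infer_instance

-- ===== CLAIM (what is proved, stated in full; the proofs are below) =====
def Claim_equal_checkWordBack : Prop := ∀ (line : String), Dom_checkWordBack line → Spec_checkWordBack line (checkWordBack line)

-- ===== LEMMAS AND PROOFS =====

-- characterization of Python's rfind scan: the greatest i ≤ j at which sub is a prefix of s.drop i
lemma rfind_go_eq (s sub : List Char) (j : Nat) :
    PySem.Chars.rfind.go s sub j =
      if ∃ i ≤ j, sub <+: s.drop i then
        ((Nat.findGreatest (fun i => sub <+: s.drop i) j : Nat) : Int)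
      else -1 := by
  induction j with
  | zero =>
    simp [PySem.Chars.rfind.go, Nat.findGreatest, List.isPrefixOf_iff_prefix]
  | succ j ih =>
    by_cases h : sub <+: s.drop (j + 1)
    · have hex : ∃ i ≤ j + 1, sub <+: s.drop i := ⟨j + 1, le_refl _, h⟩
      simp [PySem.Chars.rfind.go, List.isPrefixOf_iff_prefix, h, hex, Nat.findGreatest]
    · have hiff : (∃ i ≤ j + 1, sub <+: s.drop i) ↔ (∃ i ≤ j, sub <+: s.drop i) := by
        constructor
        · rintro ⟨i, hi, hp⟩
          rcases Nat.lt_or_ge i (j + 1) with hlt | hge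
          · exact ⟨i, Nat.lt_succ_iff.mp hlt, hp⟩
          · have : i = j + 1 := le_antisymm hi hge
            subst this; exact absurd hp h
        · rintro ⟨i, hi, hp⟩; exact ⟨i, Nat.le_succ_of_le hi, hp⟩
      have hb : sub.isPrefixOf (s.drop (j + 1)) = false := by
        rw [← Bool.not_eq_true, List.isPrefixOf_iff_prefix]; exact h
      simp only [PySem.Chars.rfind.go, hb, if_false, Bool.false_eq_true, ih, hiff]
      rw [Nat.findGreatest]
      simp [h]

lemma rfind_ge (s sub : List Char) (i : Nat) (hi : i ≤ s.length)
    (h : sub <+: s.drop i) : (i : Int) ≤ PySem.Chars.rfind s sub := by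
  unfold PySem.Chars.rfind
  rw [rfind_go_eq]
  have hex : ∃ k ≤ s.length, sub <+: s.drop k := ⟨i, hi, h⟩
  simp only [hex, if_true]
  exact_mod_cast Nat.le_findGreatest hi h

lemma rfind_neg_one (s sub : List Char) (h : PySem.Chars.rfind s sub ≠ -1) :
    ∃ m : Nat, PySem.Chars.rfind s sub = (m : Int) ∧ m ≤ s.length ∧
      sub <+: s.drop m := by
  unfold PySem.Chars.rfind at *
  rw [rfind_go_eq] at *
  by_cases hex : ∃ i ≤ s.length, sub <+: s.drop i
  · simp only [hex, if_true]
    rcases hex with ⟨i, hi, hp⟩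
    exact ⟨_, rfl, Nat.findGreatest_le _,
      Nat.findGreatest_spec (P := fun i => sub <+: s.drop i) hi hp⟩
  · simp [hex] at h

lemma rfind_ge_neg_one (s sub : List Char) : -1 ≤ PySem.Chars.rfind s sub := by
  unfold PySem.Chars.rfind
  rw [rfind_go_eq]
  split
  · exact le_trans (by norm_num) (Int.natCast_nonneg _)
  · exact le_refl _

-- facts about the nine literal words, checked by decision procedure
lemma numbersB_length : numbersB.length = 9 := by decide
lemma numbersA_length : numbersA.length = 9 := by decide

-- no digit word is a prefix of another …
lemma words_prefix_free : ∀ j < 9, ∀ k < 9, (numbersB[j]!.isPrefixOf numbersB[k]!) = true → j = k := by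
  decide

lemma wordsAB : ∀ k < 9, (numbersA[k]!).toList = numbersB[k]! := by decide

lemma words_ne_nil : ∀ k < 9, numbersB[k]! ≠ [] := by decide

-- … so two distinct words never start at the same position
lemma words_unique (t : List Char) (j k : Nat) (hj : j < 9) (hk : k < 9)
    (h1 : numbersB[j]! <+: t) (h2 : numbersB[k]! <+: t) : j = k := by
  rcases List.prefix_or_prefix_of_prefix h1 h2 with hp | hp
  · exact words_prefix_free j hj k hk (List.isPrefixOf_iff_prefix.mpr hp)
  · exact (words_prefix_free k hk j hj (List.isPrefixOf_iff_prefix.mpr hp)).symm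

-- B-side scan characterizations
lemma bScan_none (cs : List Char) (m : Nat)
    (h : ∀ i < m, numbersB.findIdx? (fun num => PySem.Chars.startswith (cs.drop i) num) = none) :
    bScan cs m = (0, 0) := by
  induction m with
  | zero => rfl
  | succ j ih =>
    rw [bScan, h j (Nat.lt_succ_self j)]
    exact ih fun i hi => h i (Nat.lt_succ_of_lt hi)

lemma bScan_found (cs : List Char) (m j : Nat) (k : Nat) (hj : j < m)
    (hk : numbersB.findIdx? (fun num => PySem.Chars.startswith (cs.drop j) num) = some k)
    (habove : ∀ i, j < i → i < m →
      numbersB.findIdx? (fun num => PySem.Chars.startswith (cs.drop i) num) = none) :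
    bScan cs m = ((k : Int) + 1, (j : Int)) := by
  induction m with
  | zero => omega
  | succ j' ih =>
    rcases Nat.lt_or_ge j j' with hlt | hge
    · rw [bScan, habove j' hlt (Nat.lt_succ_self j')]
      exact ih hlt fun i h1 h2 => habove i h1 (Nat.lt_succ_of_lt h2)
    · have : j = j' := by omega
      subst this
      rw [bScan, hk]

-- rfind of the k-th word, the quantity A's loop tracks
def rfA (line : String) (k : Nat) : Int := PySem.Str.rfind line (numbersA[k]!)

-- A-side loop invariant: after t words, (val, pos) is (0, 0) and no word seen occurs, or
-- val = v+1 with word v's rfind equal to pos, the maximum of the rfinds seen so far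
def InvA (line : String) (t : Nat) (st : Int × Int × Int × Int) : Prop :=
  st.2.2.2 = (t : Int) ∧
  ((st.2.2.1 = 0 ∧ st.2.1 = 0 ∧ ∀ k, k < t → rfA line k = -1)
   ∨ (∃ v, v < t ∧ st.2.2.1 = (v : Int) + 1 ∧ rfA line v = st.2.1 ∧ 0 ≤ st.2.1 ∧
        ∀ k, k < t → rfA line k ≤ st.2.1))

lemma stepA_inv (line : String) (t : Nat) (st : Int × Int × Int × Int) (htlt : t < 9)
    (hinv : InvA line t st) : InvA line (t + 1) (stepA line st (numbersA[t]!)) := by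
  obtain ⟨a, b, c, d⟩ := st
  obtain ⟨hx, hbr⟩ := hinv
  simp only [InvA, stepA] at hx hbr ⊢
  set temp := PySem.Str.rfind line (numbersA[t]!) with htemp
  have hrfAt : rfA line t = temp := rfl
  have htneg : -1 ≤ temp := by
    rw [htemp, PySem.Str.rfind_eq]; exact rfind_ge_neg_one _ _
  split_ifs with hc
  · dsimp only
    refine ⟨by push_cast; omega, Or.inr ⟨t, Nat.lt_succ_self t, by omega, hrfAt, by
      rcases hc with ⟨h1, -⟩; omega, ?_⟩⟩
    intro k hk
    rcases Nat.lt_or_ge k t with hkt | hge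
    · rcases hbr with ⟨hval, hpos, hall⟩ | ⟨v, hv, hval, hrf, hpos, hall⟩
      · rw [hall k hkt]; omega
      · have h2 : temp > b := by
          rcases hc with ⟨-, h2 | h2⟩
          · exact h2
          · rw [hval] at h2; omega
        have := hall k hkt; omega
    · have : k = t := by omega
      subst this; rw [hrfAt]
  · dsimp only
    refine ⟨by push_cast; omega, ?_⟩
    rcases hbr with ⟨hval, hpos, hall⟩ | ⟨v, hv, hval, hrf, hpos, hall⟩
    · left
      refine ⟨hval, hpos, ?_⟩
      intro k hk
      rcases Nat.lt_or_ge k t with hkt | hge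
      · exact hall k hkt
      · have : k = t := by omega
        subst this
        rw [hrfAt]
        omega
    · right
      refine ⟨v, Nat.lt_succ_of_lt hv, hval, hrf, hpos, ?_⟩
      intro k hk
      rcases Nat.lt_or_ge k t with hkt | hge
      · exact hall k hkt
      · have : k = t := by omega
        subst this
        rw [hrfAt]
        have hc1 : (v : Int) + 1 ≠ 0 := by omega
        rw [hval] at hc
        omega

lemma foldA_inv (line : String) : ∀ (ws : List String) (t : Nat) (st : Int × Int × Int × Int),
    numbersA.drop t = ws → t + ws.length = 9 → InvA line t st →
    InvA line 9 (ws.foldl (stepA line) st) := by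
  intro ws
  induction ws with
  | nil => intro t st _ ht hinv; simp at ht; subst ht; exact hinv
  | cons w rest ih =>
    intro t st hdrop ht hinv
    have htlt : t < 9 := by simp at ht; omega
    have htlen : t < numbersA.length := by rw [numbersA_length]; exact htlt
    rw [List.drop_eq_getElem_cons htlen] at hdrop
    obtain ⟨h1, h2⟩ := List.cons_eq_cons.mp hdrop
    have hw : w = numbersA[t]! := by
      rw [getElem!_pos numbersA t htlen]
      exact h1.symm
    have hrest : numbersA.drop (t + 1) = rest := h2
    rw [List.foldl_cons, hw]
    exact ih (t + 1) _ hrest (by simp at ht ⊢; omega) (stepA_inv line t st htlt hinv)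

-- any word starting at i ≤ n forces rfind of that word ≥ i
lemma rfA_ge (line : String) (k i : Nat) (hk : k < 9) (hi : i ≤ line.toList.length)
    (h : numbersB[k]! <+: line.toList.drop i) : (i : Int) ≤ rfA line k := by
  unfold rfA
  rw [PySem.Str.rfind_eq]
  rw [wordsAB k hk]
  exact rfind_ge _ _ i hi h

lemma main_eq (line : String) : checkWordBack line = checkWordBack_alt line := by
  have hinv0 : InvA line 0 (0, 0, 0, 0) :=
    ⟨by norm_num, Or.inl ⟨rfl, rfl, fun k hk => absurd hk (Nat.not_lt_zero k)⟩⟩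
  have hfold := foldA_inv line numbersA 0 (0, 0, 0, 0) rfl (by rw [numbersA_length]) hinv0
  set cs := line.toList with hcs
  set n := cs.length with hn
  set st := numbersA.foldl (stepA line) (0, 0, 0, 0) with hst
  have hA : checkWordBack line = (st.2.2.1, st.2.1) := rfl
  have hB : checkWordBack_alt line = bScan cs n := rfl
  rw [hA, hB]
  obtain ⟨-, hbr⟩ := hfold
  rcases hbr with ⟨hval, hpos, hall⟩ | ⟨v, hv, hval, hrf, hpos, hall⟩
  · -- no word occurs anywhere: both return (0, 0)
    rw [hval, hpos, bScan_none]
    intro i hi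
    rw [List.findIdx?_eq_none_iff]
    intro num hmem
    rcases List.mem_iff_getElem.mp hmem with ⟨k, hklen, hknum⟩
    have hk9 : k < 9 := by rw [numbersB_length] at hklen; exact hklen
    have hknum' : numbersB[k]! = num := by rw [getElem!_pos numbersB k hklen, hknum]
    by_contra hcontra
    rw [Bool.not_eq_false, PySem.Chars.startswith_iff, ← hknum'] at hcontra
    have := rfA_ge line k i hk9 (le_of_lt hi) hcontra
    rw [hall k hk9] at this
    omega
  · -- word v occurs rightmost, at position m = st.2.1
    have hv9 : v < 9 := by omega
    have hrfc : PySem.Chars.rfind cs (numbersB[v]!) = st.2.1 := by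
      rw [← wordsAB v hv9, ← PySem.Str.rfind_eq]; exact hrf
    have hne : PySem.Chars.rfind cs (numbersB[v]!) ≠ -1 := by omega
    obtain ⟨m, hm, hmle, hmpre⟩ := rfind_neg_one cs (numbersB[v]!) hne
    have hposm : st.2.1 = (m : Int) := by rw [← hrfc, hm]
    have hmn : m < n := by
      rcases Nat.lt_or_ge m n with h | h
      · exact h
      · exfalso
        have hnil : cs.drop m = [] := List.drop_eq_nil_of_le h
        rw [hnil, List.prefix_nil] at hmpre
        exact words_ne_nil v hv9 hmpre
    have hfound : numbersB.findIdx? (fun num => PySem.Chars.startswith (cs.drop m) num) = some v := by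
      rw [List.findIdx?_eq_some_iff_getElem]
      have hvlen : v < numbersB.length := by rw [numbersB_length]; exact hv9
      refine ⟨hvlen, ?_, ?_⟩
      · rw [PySem.Chars.startswith_iff, ← getElem!_pos numbersB v hvlen]
        exact hmpre
      · intro j hjv
        have hjlen : j < numbersB.length := lt_trans hjv hvlen
        have hj9 : j < 9 := by rw [numbersB_length] at hjlen; exact hjlen
        intro hcontra
        rw [PySem.Chars.startswith_iff, ← getElem!_pos numbersB j hjlen] at hcontra
        exact absurd (words_unique (cs.drop m) j v hj9 hv9 hcontra hmpre) (by omega)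
    have habove : ∀ i, m < i → i < n →
        numbersB.findIdx? (fun num => PySem.Chars.startswith (cs.drop i) num) = none := by
      intro i hmi hin
      rw [List.findIdx?_eq_none_iff]
      intro num hmem
      rcases List.mem_iff_getElem.mp hmem with ⟨k, hklen, hknum⟩
      have hk9 : k < 9 := by rw [numbersB_length] at hklen; exact hklen
      have hknum' : numbersB[k]! = num := by rw [getElem!_pos numbersB k hklen, hknum]
      by_contra hcontra
      rw [Bool.not_eq_false, PySem.Chars.startswith_iff, ← hknum'] at hcontra
      have h1 := rfA_ge line k i hk9 (le_of_lt hin) hcontra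
      have h2 := hall k hk9
      omega
    rw [bScan_found cs n m v hmn hfound habove, hval, hposm]

-- ===== VERDICT (by name: the statement is the Claim_ definition above) =====
theorem checkWordBack_spec : Claim_equal_checkWordBack := by
  intro line _
  exact main_eq line
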